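-- pv_equiv track=rewrite | github.com/Amo10/Computer-Science-2014-2015 | playing_with_randoms_Aidan.py | get_mode
-- ===== SOURCE A (Python) =====
-- def get_mode(numlist,numdict):
--     mode = 0
--     for i in numdict:
--         if numdict[i] > mode:
--             mode = numdict[i]
--     modelist = []
--     for i in numdict:
--         if numdict[i] == mode:
--             modelist.append(i)
--     return modelist
-- ===== SOURCE B (Python) =====
-- def get_mode(numlist, numdict):
--     # single pass: track running maximum and its keys together
--     mode = 0
--     modelist = []
--     for i in numdict:
--         v = numdict[i]
--         if v > mode:
--             mode = v
--             modelist = [i]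
--         elif v == mode:
--             modelist.append(i)
--     return modelist
-- ===== Notes on version B (the rewrite author's own statement) =====
-- stated objective: alternative
-- what changed: Replaces A's two sequential passes (one to find the maximum value, one to collect matching keys) with a single pass that maintains the running maximum and the list of keys attaining it, resetting the list whenever a strictly larger value appears.
import Mathlib
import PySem

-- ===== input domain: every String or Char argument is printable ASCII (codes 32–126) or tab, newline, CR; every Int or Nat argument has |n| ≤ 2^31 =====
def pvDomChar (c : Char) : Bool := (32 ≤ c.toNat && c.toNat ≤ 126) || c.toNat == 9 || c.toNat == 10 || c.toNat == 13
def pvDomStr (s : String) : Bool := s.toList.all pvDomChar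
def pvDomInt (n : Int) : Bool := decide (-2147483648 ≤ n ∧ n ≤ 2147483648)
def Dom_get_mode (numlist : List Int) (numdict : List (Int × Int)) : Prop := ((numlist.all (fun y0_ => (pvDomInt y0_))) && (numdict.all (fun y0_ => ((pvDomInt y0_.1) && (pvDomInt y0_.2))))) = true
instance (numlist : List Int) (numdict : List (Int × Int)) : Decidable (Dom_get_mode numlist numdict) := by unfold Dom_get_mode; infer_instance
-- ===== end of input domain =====

-- B merges A's two sequential passes into ONE pass tracking (running max, keys attaining it);
-- return values proved equal on all inputs (alternative decomposition, same asymptotic cost).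

-- ===== PORT A =====
-- two passes over the dict's keys: first find the maximum value (starting from 0),
-- then collect the keys whose value equals it
def get_mode (numlist : List Int) (numdict : List (Int × Int)) : List Int :=
  let d := PySem.Dict.mk numdict
  let mode := d.keys.foldl (fun mode i => if d.getD i 0 > mode then d.getD i 0 else mode) 0
  d.keys.foldl (fun modelist i => if d.getD i 0 == mode then modelist ++ [i] else modelist) []

-- ===== PORT B =====
-- single pass: state (mode, modelist); a strictly larger value resets the list, an equal one appends
def get_mode_alt (numlist : List Int) (numdict : List (Int × Int)) : List Int :=
  let d := PySem.Dict.mk numdict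
  (d.keys.foldl (fun (st : Int × List Int) i =>
      if d.getD i 0 > st.1 then (d.getD i 0, [i])
      else if d.getD i 0 == st.1 then (st.1, st.2 ++ [i])
      else st) ((0 : Int), ([] : List Int))).2

-- ===== PRECONDITION & SPEC =====
def Spec_get_mode (numlist : List Int) (numdict : List (Int × Int)) (out : List Int) : Prop := out = get_mode_alt numlist numdict
instance (numlist : List Int) (numdict : List (Int × Int)) (out : List Int) : Decidable (Spec_get_mode numlist numdict out) := by unfold Spec_get_mode; infer_instance

-- ===== CLAIM (what is proved, stated in full; the proofs are below) =====
def Claim_equal_get_mode : Prop := ∀ (numlist : List Int) (numdict : List (Int × Int)), Dom_get_mode numlist numdict → Spec_get_mode numlist numdict (get_mode numlist numdict)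

-- ===== LEMMAS AND PROOFS =====

-- running maximum of A's first loop over the keys of d
def pvMaxv (d : PySem.Dict Int Int) (l : List Int) (m : Int) : Int :=
  l.foldl (fun m i => if d.getD i 0 > m then d.getD i 0 else m) m

theorem pvMaxv_cons (d : PySem.Dict Int Int) (i : Int) (t : List Int) (m : Int) :
    pvMaxv d (i :: t) m = pvMaxv d t (if d.getD i 0 > m then d.getD i 0 else m) := rfl

theorem pvMaxv_mono (d : PySem.Dict Int Int) (l : List Int) (m : Int) : m ≤ pvMaxv d l m := by
  induction l generalizing m with
  | nil => simp [pvMaxv]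
  | cons i t ih =>
    rw [pvMaxv_cons]
    split_ifs with h
    · exact le_of_lt (lt_of_lt_of_le h (ih (d.getD i 0)))
    · exact ih m

-- B's fold from any state computes (final max, reset-or-keep accumulator ++ keys attaining the final max)
theorem pvB_fold (d : PySem.Dict Int Int) (l : List Int) (m : Int) (acc : List Int) :
    l.foldl (fun (st : Int × List Int) i =>
        if d.getD i 0 > st.1 then (d.getD i 0, [i])
        else if d.getD i 0 == st.1 then (st.1, st.2 ++ [i])
        else st) (m, acc)
      = (pvMaxv d l m,
         (if pvMaxv d l m > m then [] else acc) ++ l.filter (fun i => d.getD i 0 == pvMaxv d l m)) := by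
  induction l generalizing m acc with
  | nil => simp [pvMaxv]
  | cons i t ih =>
    rw [List.foldl_cons, pvMaxv_cons, List.filter_cons]
    by_cases h : d.getD i 0 > m
    · rw [if_pos h, if_pos h, ih]
      have hle : d.getD i 0 ≤ pvMaxv d t (d.getD i 0) := pvMaxv_mono d t (d.getD i 0)
      have hm : m < pvMaxv d t (d.getD i 0) := lt_of_lt_of_le h hle
      rw [if_pos hm]
      by_cases h2 : pvMaxv d t (d.getD i 0) > d.getD i 0
      · rw [if_pos h2]
        have hne : (d.getD i 0 == pvMaxv d t (d.getD i 0)) = false := by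
          simp only [beq_eq_false_iff_ne]; exact ne_of_lt h2
        rw [hne]
        simp
      · rw [if_neg h2]
        have heq : d.getD i 0 = pvMaxv d t (d.getD i 0) := le_antisymm hle (not_lt.mp h2)
        have hbe : (d.getD i 0 == pvMaxv d t (d.getD i 0)) = true := by
          rw [← heq]; exact beq_self_eq_true _
        rw [hbe]
        simp
    · rw [if_neg h, if_neg h]
      by_cases he : d.getD i 0 == m
      · rw [if_pos he, ih]
        have hem : d.getD i 0 = m := eq_of_beq he
        by_cases h2 : pvMaxv d t m > m
        · rw [if_pos h2, if_pos h2]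
          have hne : (d.getD i 0 == pvMaxv d t m) = false := by
            simp only [beq_eq_false_iff_ne]; rw [hem]; exact ne_of_lt h2
          rw [hne]
          simp
        · rw [if_neg h2, if_neg h2]
          have heq : m = pvMaxv d t m := le_antisymm (pvMaxv_mono d t m) (not_lt.mp h2)
          have hbe : (d.getD i 0 == pvMaxv d t m) = true := by
            rw [hem, ← heq]; exact beq_self_eq_true _
          rw [hbe]
          simp
      · rw [if_neg (by simpa using he), ih]
        have hlt : d.getD i 0 < m := lt_of_le_of_ne (not_lt.mp h) (by simpa using he)
        have hne : (d.getD i 0 == pvMaxv d t m) = false := by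
          simp only [beq_eq_false_iff_ne]
          exact ne_of_lt (lt_of_lt_of_le hlt (pvMaxv_mono d t m))
        rw [hne]
        simp

-- ===== VERDICT (by name: the statement is the Claim_ definition above) =====
theorem get_mode_spec : Claim_equal_get_mode := by
  intro numlist numdict _
  unfold Spec_get_mode get_mode get_mode_alt
  simp only []
  rw [pvB_fold (PySem.Dict.mk numdict) (PySem.Dict.mk numdict).keys 0 []]
  rw [PySem.List.foldl_append_if_eq_filter]
  simp only [List.nil_append]
  have : pvMaxv (PySem.Dict.mk numdict) (PySem.Dict.mk numdict).keys 0
      = (PySem.Dict.mk numdict).keys.foldl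
          (fun mode i => if (PySem.Dict.mk numdict).getD i 0 > mode then (PySem.Dict.mk numdict).getD i 0 else mode) 0 := rfl
  rw [← this]
  split_ifs <;> simp
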